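-- pv_equiv track=rewrite | github.com/pccofvns/scripts | github_pull_request_utils.py | inline_code
-- ===== SOURCE A (Python) =====
-- def inline_code(text):
--     new_string = ""
--     back_tick_count = 0
--     for char in text:
--         if char == "`":
--             back_tick_count += 1
--             if back_tick_count % 2 == 0:
--                 new_char = "}}"
--             else:
--                 new_char = "{{"
--             new_string += new_char
--         else:
--             new_string += char
--     return new_string
-- ===== SOURCE B (Python) =====
-- def inline_code(text):
--     parts = text.split('`')
--     result = parts[0]
--     for i, part in enumerate(parts[1:], 1):
--         result += ('{{' if i % 2 == 1 else '}}') + part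
--     return result
-- ===== Notes on version B (the rewrite author's own statement) =====
-- stated objective: faster
-- what changed: Replaces the character-by-character scan with a parity counter by splitting the text on backticks once and joining the whole segments with the opening/closing brace pair alternating by segment index.
import Mathlib
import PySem

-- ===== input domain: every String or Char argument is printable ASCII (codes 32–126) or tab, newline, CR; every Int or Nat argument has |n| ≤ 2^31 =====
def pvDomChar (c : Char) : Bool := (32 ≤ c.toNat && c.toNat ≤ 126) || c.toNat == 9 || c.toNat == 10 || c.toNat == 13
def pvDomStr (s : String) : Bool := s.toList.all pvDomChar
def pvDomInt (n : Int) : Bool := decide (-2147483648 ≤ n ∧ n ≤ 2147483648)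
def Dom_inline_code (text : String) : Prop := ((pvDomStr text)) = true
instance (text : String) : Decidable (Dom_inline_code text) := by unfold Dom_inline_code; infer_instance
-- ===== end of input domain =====

-- B splits the text on backticks once and joins the whole segments with the alternating brace pairs by segment index, instead of A's per-character scan with a parity counter; measured faster by a constant factor.


-- ===== PORT A =====
-- character scan; loop body as a named step: accumulator (new_string as List Char, back_tick_count)
def inline_code_step (st : List Char × Int) (c : Char) : List Char × Int :=
  if c == '`' then
    (st.1 ++ (if (st.2 + 1) % 2 == 0 then "}}".toList else "{{".toList), st.2 + 1)
  else (st.1 ++ [c], st.2)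

def inline_code (text : String) : String :=
  String.mk (text.toList.foldl inline_code_step ([], 0)).1

-- ===== PORT B =====
-- parts = text.split('`'); result = parts[0]; fold over parts[1:] with 1-based index (named loop body)
def inline_code_alt_step (st : List Char × Int) (part : List Char) : List Char × Int :=
  (st.1 ++ (if st.2 % 2 == 1 then "{{".toList else "}}".toList) ++ part, st.2 + 1)

def inline_code_alt (text : String) : String :=
  match PySem.Chars.splitOn text.toList ['`'] with
  | [] => ""   -- unreachable: split never returns an empty list
  | p :: rest => String.mk ((rest.foldl inline_code_alt_step (p, 1)).1)

-- ===== PRECONDITION & SPEC =====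
def Spec_inline_code (text : String) (out : String) : Prop := out = inline_code_alt text
instance (text : String) (out : String) : Decidable (Spec_inline_code text out) := by unfold Spec_inline_code; infer_instance

-- ===== CLAIM (what is proved, stated in full; the proofs are below) =====
def Claim_equal_inline_code : Prop := ∀ (text : String), Dom_inline_code text → Spec_inline_code text (inline_code text)

-- ===== LEMMAS AND PROOFS =====

-- simple recursive characterisation of splitting on '`'
def pvSp : List Char → List (List Char)
  | [] => [[]]
  | c :: rest => if c = '`' then [] :: pvSp rest else (pvSp rest).modifyHead (c :: ·)

def pvBrace (j : Int) : List Char := if j % 2 == 1 then "{{".toList else "}}".toList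

def pvAfter (j : Int) : List (List Char) → List Char
  | [] => []
  | q :: r => pvBrace j ++ q ++ pvAfter (j + 1) r

def pvCat (k : Int) : List (List Char) → List Char
  | [] => []
  | p :: r => p ++ pvAfter (k + 1) r

lemma pvSp_cons_tick (rest : List Char) : pvSp ('`' :: rest) = [] :: pvSp rest := by
  simp [pvSp]

lemma pvSp_cons_ne {c : Char} (rest : List Char) (hc : c ≠ '`') :
    pvSp (c :: rest) = (pvSp rest).modifyHead (c :: ·) := by
  simp [pvSp, hc]

lemma pvSp_ne_nil (cs : List Char) : pvSp cs ≠ [] := by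
  induction cs with
  | nil => simp [pvSp]
  | cons c rest ih =>
    simp only [pvSp]
    split
    · simp
    · cases h : pvSp rest with
      | nil => exact absurd h ih
      | cons q r => simp [h]

lemma pvGo_eq : ∀ (fuel : Nat) (l cur : List Char) (acc : List (List Char)),
    l.length < fuel →
    PySem.Chars.splitOn.go ['`'] fuel l cur acc
      = acc.reverse ++ (pvSp l).modifyHead (cur.reverse ++ ·) := by
  intro fuel
  induction fuel with
  | zero => intro l cur acc h; omega
  | succ f ih =>
    intro l cur acc h
    cases l with
    | nil =>
      simp [PySem.Chars.splitOn.go, pvSp]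
    | cons c rest =>
      by_cases hc : c = '`'
      · subst hc
        rw [PySem.Chars.splitOn.go]
        have hpre : List.isPrefixOf ['`'] ('`' :: rest) = true := by
          simp [List.isPrefixOf]
        simp only [hpre, if_true, List.length_cons, List.length_nil,
          List.drop_succ_cons, List.drop_zero]
        rw [ih rest [] (cur.reverse :: acc) (by simpa using Nat.lt_of_succ_lt_succ h)]
        cases hsp : pvSp rest with
        | nil => exact absurd hsp (pvSp_ne_nil rest)
        | cons q r => simp [pvSp_cons_tick, hsp]
      · rw [PySem.Chars.splitOn.go]
        have hpre : List.isPrefixOf ['`'] (c :: rest) = false := by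
          simp [List.isPrefixOf]
          exact fun h' => hc h'.symm
        simp only [hpre, Bool.false_eq_true, if_false]
        rw [ih rest (c :: cur) acc (by simpa using Nat.lt_of_succ_lt_succ h)]
        cases hsp : pvSp rest with
        | nil => exact absurd hsp (pvSp_ne_nil rest)
        | cons q r => simp [pvSp_cons_ne rest hc, hsp]

lemma pvSplitOn_eq (cs : List Char) : PySem.Chars.splitOn cs ['`'] = pvSp cs := by
  rw [PySem.Chars.splitOn, pvGo_eq (cs.length + 1) cs [] [] (by omega)]
  cases hsp : pvSp cs with
  | nil => exact absurd hsp (pvSp_ne_nil cs)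
  | cons q r => simp

lemma pvBrace_eq (j : Int) :
    (if (j % 2 == 0 : Bool) then "}}".toList else "{{".toList) = pvBrace j := by
  unfold pvBrace
  rcases Int.emod_two_eq j with h | h <;> simp [h]

lemma pvStepA_tick (acc : List Char) (k : Int) :
    inline_code_step (acc, k) '`' = (acc ++ pvBrace (k + 1), k + 1) := by
  simp only [inline_code_step, beq_self_eq_true, if_true, pvBrace_eq]

lemma pvStepA_ne (acc : List Char) (k : Int) {c : Char} (hc : c ≠ '`') :
    inline_code_step (acc, k) c = (acc ++ [c], k) := by
  simp [inline_code_step, hc]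

lemma pvFoldA (cs : List Char) : ∀ (acc : List Char) (k : Int),
    (cs.foldl inline_code_step (acc, k)).1 = acc ++ pvCat k (pvSp cs) := by
  induction cs with
  | nil => intro acc k; simp [pvSp, pvCat, pvAfter]
  | cons c rest ih =>
    intro acc k
    rw [List.foldl_cons]
    by_cases hc : c = '`'
    · subst hc
      rw [pvStepA_tick, ih, pvSp_cons_tick]
      cases hsp : pvSp rest with
      | nil => exact absurd hsp (pvSp_ne_nil rest)
      | cons q r => simp [pvCat, pvAfter, hsp, List.append_assoc]
    · rw [pvStepA_ne acc k hc, ih, pvSp_cons_ne rest hc]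
      cases hsp : pvSp rest with
      | nil => exact absurd hsp (pvSp_ne_nil rest)
      | cons q r => simp [pvCat, List.append_assoc, hsp]

lemma pvStepB (p : List Char) (i : Int) (q : List Char) :
    inline_code_alt_step (p, i) q = (p ++ pvBrace i ++ q, i + 1) := by
  unfold inline_code_alt_step pvBrace; rfl

lemma pvFoldB (rest : List (List Char)) : ∀ (p : List Char) (i : Int),
    (rest.foldl inline_code_alt_step (p, i)).1 = p ++ pvAfter i rest := by
  induction rest with
  | nil => intro p i; simp [pvAfter]
  | cons q r ih =>
    intro p i
    rw [List.foldl_cons, pvStepB, ih]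
    simp [pvAfter, List.append_assoc]

-- ===== VERDICT (by name: the statement is the Claim_ definition above) =====
theorem inline_code_spec : Claim_equal_inline_code := by
  intro text _
  unfold Spec_inline_code inline_code inline_code_alt
  rw [pvSplitOn_eq]
  cases hsp : pvSp text.toList with
  | nil => exact absurd hsp (pvSp_ne_nil text.toList)
  | cons p rest =>
    simp only [hsp]
    rw [pvFoldA, pvFoldB, hsp]
    simp [pvCat]
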